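-- pv_equiv track=rewrite | github.com/taleldayekh/sudoku-solver | server/sudoku.py | validate_region
-- ===== SOURCE A (Python) =====
-- from typing import List
--
-- def validate_region(region: List[int]) -> bool:
--     numbers_unique = set()
--     for num in region:
--         if num > 0:
--             if num in numbers_unique:
--                 return False
--             numbers_unique.add(num)
--     return True
-- ===== SOURCE B (Python) =====
-- def validate_region(region):
--     positives = sorted(n for n in region if n > 0)
--     return all(a != b for a, b in zip(positives, positives[1:]))
-- ===== Notes on version B (the rewrite author's own statement) =====
-- stated objective: alternative
-- what changed: Replaces the hash-set loop with early return by a sort-then-scan: sort the positive numbers and check that no two adjacent elements are equal (correct because duplicates become adjacent after sorting).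
import Mathlib
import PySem

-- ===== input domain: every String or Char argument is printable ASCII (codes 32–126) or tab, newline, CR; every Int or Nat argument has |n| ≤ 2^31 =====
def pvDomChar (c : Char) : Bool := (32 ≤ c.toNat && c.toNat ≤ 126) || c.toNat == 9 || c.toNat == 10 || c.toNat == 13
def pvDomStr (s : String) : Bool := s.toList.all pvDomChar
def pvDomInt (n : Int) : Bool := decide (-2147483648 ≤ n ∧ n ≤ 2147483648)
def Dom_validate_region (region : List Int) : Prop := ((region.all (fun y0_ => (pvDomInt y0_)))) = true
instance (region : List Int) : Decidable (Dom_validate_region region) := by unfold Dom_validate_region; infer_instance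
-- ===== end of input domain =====

-- B replaces A's incremental seen-set loop with early return by sort-then-scan:
-- sort the positive numbers and check no two adjacent elements are equal (alternative algorithm, same answer).

-- ===== PORT A =====
-- the loop of A: seen set threaded through, early return False on a repeated positive
def validateRegionLoop : List Int → PySem.Set Int → Bool
  | [], _ => true
  | num :: rest, seen =>
    if num > 0 then
      if PySem.Set.contains seen num then false
      else validateRegionLoop rest (PySem.Set.add seen num)
    else validateRegionLoop rest seen

def validate_region (region : List Int) : Bool :=
  validateRegionLoop region PySem.Set.empty

-- ===== PORT B =====
-- positives[1:] is ported as `.drop 1` (exact for a list slice from index 1)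
def validate_region_alt (region : List Int) : Bool :=
  let positives := PySem.List.sorted (region.filter (fun n => decide (n > 0))) (fun x => x) false
  (positives.zip (positives.drop 1)).all (fun p => decide (p.1 ≠ p.2))

-- ===== PRECONDITION & SPEC =====
def Spec_validate_region (region : List Int) (out : Bool) : Prop := out = validate_region_alt region
instance (region : List Int) (out : Bool) : Decidable (Spec_validate_region region out) := by unfold Spec_validate_region; infer_instance

-- ===== CLAIM (what is proved, stated in full; the proofs are below) =====
def Claim_equal_validate_region : Prop := ∀ (region : List Int), Dom_validate_region region → Spec_validate_region region (validate_region region)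

-- ===== LEMMAS AND PROOFS =====

-- A's loop decides Nodup of seen ++ filtered positives (for a duplicate-free seen)
theorem pv_loop_eq_nodup (xs : List Int) : ∀ (seen : PySem.Set Int), seen.Nodup →
    validateRegionLoop xs seen =
      decide ((seen ++ xs.filter (fun n => decide (n > 0))).Nodup) := by
  induction xs with
  | nil => intro seen hs; simp [validateRegionLoop, hs]
  | cons num rest ih =>
    intro seen hs
    by_cases hp : num > 0
    · by_cases hc : PySem.Set.contains seen num = true
      · have hmem : num ∈ seen := (PySem.Set.contains_iff seen num).mp hc
        simp only [validateRegionLoop]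
        rw [if_pos hp, if_pos hc]
        rw [List.filter_cons_of_pos (by simpa using hp)]
        symm
        simp only [decide_eq_false_iff_not, List.nodup_append]
        intro ⟨_, _, hdisj⟩
        exact hdisj num hmem num (by simp) rfl
      · have hnmem : num ∉ seen := fun h => hc ((PySem.Set.contains_iff seen num).mpr h)
        have hadd : PySem.Set.add seen num = seen ++ [num] := PySem.Set.add_of_not_mem hnmem
        have hs' : (PySem.Set.add seen num).Nodup := by
          rw [hadd]
          refine List.nodup_append.mpr ⟨hs, by simp, ?_⟩
          intro a ha b hb
          simp only [List.mem_singleton] at hb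
          subst hb
          exact fun he => hnmem (he ▸ ha)
        simp only [validateRegionLoop]
        rw [if_pos hp, if_neg hc]
        rw [ih _ hs', hadd]
        rw [List.filter_cons_of_pos (by simpa using hp)]
        congr 1
        simp
    · simp only [validateRegionLoop]
      rw [if_neg hp]
      rw [ih _ hs]
      rw [List.filter_cons_of_neg (by simpa using hp)]

-- on a ≤-sorted list, "no two adjacent equal" is exactly Nodup
theorem pv_adj_nodup (l : List Int) :
    l.Pairwise (· ≤ ·) →
      (((l.zip (l.drop 1)).all (fun p => decide (p.1 ≠ p.2)) = true) ↔ l.Nodup) := by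
  induction l with
  | nil => simp
  | cons a l ih =>
    intro h
    match l, ih with
    | [], _ => simp
    | b :: t, ih =>
      have hpair := (List.pairwise_cons.mp h)
      have hab : a ≤ b := hpair.1 b (by simp)
      have htail := hpair.2
      have hbt := List.pairwise_cons.mp htail
      simp only [List.drop_one, List.tail_cons, List.zip_cons_cons, List.all_cons,
        Bool.and_eq_true, decide_eq_true_eq]
      rw [show (b :: t).zip t = (b :: t).zip ((b :: t).drop 1) by simp]
      rw [ih htail]
      constructor
      · rintro ⟨hne, hnd⟩
        refine List.nodup_cons.mpr ⟨?_, hnd⟩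
        intro hmem
        rcases List.mem_cons.mp hmem with h1 | h2
        · exact hne h1
        · exact absurd (hbt.1 a h2) (not_le.mpr (lt_of_le_of_ne hab hne))
      · intro hnd
        have := List.nodup_cons.mp hnd
        exact ⟨fun he => this.1 (he ▸ by simp), this.2⟩

-- ===== VERDICT (by name: the statement is the Claim_ definition above) =====
theorem validate_region_spec : Claim_equal_validate_region := by
  intro region _
  unfold Spec_validate_region validate_region validate_region_alt
  set f := region.filter (fun n => decide (n > 0)) with hf
  set s := PySem.List.sorted f (fun x => x) false with hsrt
  have hperm : s.Perm f := PySem.List.sorted_perm f (fun x => x) false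
  have hpair : s.Pairwise (· ≤ ·) := by
    have := PySem.List.sorted_pairwise (xs := f) (key := fun x => x)
    simpa using this
  have hA : validateRegionLoop region PySem.Set.empty = decide f.Nodup := by
    rw [pv_loop_eq_nodup region PySem.Set.empty (by simp [PySem.Set.empty])]
    simp only [PySem.Set.empty, List.nil_append]
    rw [← hf]
    exact decide_eq_decide.mpr Iff.rfl
  rw [hA]
  have hB := pv_adj_nodup s hpair
  have hnd : s.Nodup ↔ f.Nodup := hperm.nodup_iff
  by_cases h : f.Nodup
  · simp only [h, decide_true]
    exact (hB.mpr (hnd.mpr h)).symm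
  · simp only [h, decide_false]
    symm
    rw [Bool.eq_false_iff]
    intro hall
    exact h (hnd.mp (hB.mp hall))
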